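-- pv_equiv track=rewrite | github.com/peixiang6134/tf_bot_examples | textcnn/my_code/util/str_util.py | skip_starting_empty_lines
-- ===== SOURCE A (Python) =====
-- def skip_starting_empty_lines(lines):
--     lines_left = []
--     left = False
--     for line in lines:
--         if left:
--             lines_left.append(line)
--         elif len(line.strip()) > 0:
--             lines_left.append(line)
--             left = True
--     return lines_left
-- ===== SOURCE B (Python) =====
-- def skip_starting_empty_lines(lines):
--     idx = next((i for i, line in enumerate(lines) if line.strip()), len(lines))
--     return lines[idx:]
-- ===== Notes on version B (the rewrite author's own statement) =====
-- stated objective: simpler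
-- what changed: B finds the index of the first non-blank line and returns one slice, instead of A's flag-driven loop that appends element by element.
import Mathlib
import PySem

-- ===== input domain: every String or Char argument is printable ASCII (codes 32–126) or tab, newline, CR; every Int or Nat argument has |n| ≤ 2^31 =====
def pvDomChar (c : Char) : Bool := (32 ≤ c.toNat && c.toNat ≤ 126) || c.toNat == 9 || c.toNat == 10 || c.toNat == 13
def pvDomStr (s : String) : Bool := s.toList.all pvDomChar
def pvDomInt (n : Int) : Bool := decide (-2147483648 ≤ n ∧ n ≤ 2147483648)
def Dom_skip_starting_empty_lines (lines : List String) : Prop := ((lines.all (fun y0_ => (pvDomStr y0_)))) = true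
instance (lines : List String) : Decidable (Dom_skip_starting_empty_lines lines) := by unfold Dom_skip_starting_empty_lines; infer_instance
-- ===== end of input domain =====

-- B finds the split index and slices once; A accumulates with a flag. Objective: simpler decomposition, same cost.

-- ===== PORT A =====
-- A's loop: state is (lines_left, left); each line appended if left, or if its strip is non-empty (then left := True).
def pvALoop : List String → List String → Bool → List String
  | [], acc, _ => acc
  | l :: rest, acc, left =>
    if left then pvALoop rest (acc ++ [l]) left
    else if (PySem.Str.strip l).length > 0 then pvALoop rest (acc ++ [l]) true
    else pvALoop rest acc left

def skip_starting_empty_lines (lines : List String) : List String :=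
  pvALoop lines [] false

-- ===== PORT B =====
-- Source B: idx = first i with lines[i].strip() truthy (default len(lines)); return lines[idx:].
def skip_starting_empty_lines_alt (lines : List String) : List String :=
  lines.drop (lines.findIdx (fun l => (PySem.Str.strip l).length > 0))

-- ===== PRECONDITION & SPEC =====
def Spec_skip_starting_empty_lines (lines : List String) (out : List String) : Prop := out = skip_starting_empty_lines_alt lines
instance (lines : List String) (out : List String) : Decidable (Spec_skip_starting_empty_lines lines out) := by unfold Spec_skip_starting_empty_lines; infer_instance

-- ===== CLAIM (what is proved, stated in full; the proofs are below) =====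
def Claim_equal_skip_starting_empty_lines : Prop := ∀ (lines : List String), Dom_skip_starting_empty_lines lines → Spec_skip_starting_empty_lines lines (skip_starting_empty_lines lines)

-- ===== LEMMAS AND PROOFS =====

-- Once the flag is set, A's loop appends every remaining line.
theorem pvALoop_true (rest : List String) (acc : List String) :
    pvALoop rest acc true = acc ++ rest := by
  induction rest generalizing acc with
  | nil => simp [pvALoop]
  | cons l t ih => simp [pvALoop, ih]

theorem pvALoop_eq_alt (lines : List String) :
    pvALoop lines [] false = skip_starting_empty_lines_alt lines := by
  induction lines with
  | nil => simp [pvALoop, skip_starting_empty_lines_alt]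
  | cons l t ih =>
    by_cases h : (PySem.Str.strip l).length > 0
    · simp [pvALoop, skip_starting_empty_lines_alt, h, pvALoop_true, List.findIdx_cons]
    · simp [pvALoop, skip_starting_empty_lines_alt, h, List.findIdx_cons] at *
      exact ih

-- ===== VERDICT (by name: the statement is the Claim_ definition above) =====
theorem skip_starting_empty_lines_spec : Claim_equal_skip_starting_empty_lines := by
  intro lines _
  show skip_starting_empty_lines lines = skip_starting_empty_lines_alt lines
  exact pvALoop_eq_alt lines
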